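-- pv_equiv track=rewrite | github.com/gembleman/eztrans-rs | scripts/generate_rust_matches.py | find_unicode_ranges
-- ===== SOURCE A (Python) =====
-- from typing import List, Tuple
--
-- def find_unicode_ranges(code_points: List[int]) -> List[Tuple[int, int]]:
--     """연속된 유니코드 코드 포인트들을 범위로 그룹화"""
--     if not code_points:
--         return []
--
--     # 정렬
--     sorted_points = sorted(set(code_points))
--
--     ranges = []
--     start = sorted_points[0]
--     end = sorted_points[0]
--
--     for point in sorted_points[1:]:
--         if point == end + 1:
--             # 연속된 범위 확장
--             end = point
--         else:
--             # 새로운 범위 시작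
--             ranges.append((start, end))
--             start = point
--             end = point
--
--     # 마지막 범위 추가
--     ranges.append((start, end))
--
--     return ranges
-- ===== SOURCE B (Python) =====
-- from itertools import groupby
-- from typing import List, Tuple
--
-- def find_unicode_ranges(code_points: List[int]) -> List[Tuple[int, int]]:
--     sorted_points = sorted(set(code_points))
--     if not sorted_points:
--         return []
--     ranges = []
--     for _, grp in groupby(enumerate(sorted_points), key=lambda iv: iv[1] - iv[0]):
--         group = list(grp)
--         ranges.append((group[0][1], group[-1][1]))
--     return ranges
-- ===== Notes on version B (the rewrite author's own statement) =====
-- stated objective: idiomatic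
-- what changed: Replaced A's explicit start/end accumulator-and-branch scan with itertools.groupby over enumerate(sorted(set(points))) keyed by value-minus-index, emitting (first, last) of each group.
import Mathlib
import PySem

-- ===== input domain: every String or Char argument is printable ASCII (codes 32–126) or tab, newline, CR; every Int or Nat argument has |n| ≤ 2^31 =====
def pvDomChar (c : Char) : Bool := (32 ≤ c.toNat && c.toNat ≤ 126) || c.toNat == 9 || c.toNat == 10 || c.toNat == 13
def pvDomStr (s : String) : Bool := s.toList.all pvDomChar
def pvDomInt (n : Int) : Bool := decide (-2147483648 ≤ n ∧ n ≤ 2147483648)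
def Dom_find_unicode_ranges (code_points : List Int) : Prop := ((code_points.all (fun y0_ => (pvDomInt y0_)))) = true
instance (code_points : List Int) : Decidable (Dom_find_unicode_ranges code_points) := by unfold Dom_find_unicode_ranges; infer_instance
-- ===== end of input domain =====

-- B groups enumerate(sorted(set(points))) with groupby keyed by value-minus-index instead of A's
-- explicit start/end accumulator scan (objective: idiomatic; same cost).

-- ===== PORT A =====
def find_unicode_ranges (code_points : List Int) : List (Int × Int) :=
  if code_points = [] then []
  else
    -- sorted(set(code_points))
    match PySem.List.sorted (PySem.Set.ofList code_points) (fun x => x) false with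
    | [] => []  -- unreachable: sorted(set(..)) of a nonempty list is nonempty
    | s0 :: rest =>
      -- state = (ranges, start, end); loop over sorted_points[1:]
      let st := rest.foldl (fun (st : List (Int × Int) × Int × Int) point =>
        if point = st.2.2 + 1 then (st.1, st.2.1, point)
        else (st.1 ++ [(st.2.1, st.2.2)], point, point)) ([], s0, s0)
      st.1 ++ [(st.2.1, st.2.2)]

-- ===== PORT B =====
-- enumerate(sorted_points)
def pvEnumFrom (i : Int) : List Int → List (Int × Int)
  | [] => []
  | v :: vs => (i, v) :: pvEnumFrom (i + 1) vs

-- itertools.groupby with key = iv[1] - iv[0] (each group read fully, in order)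
def pvGroupBy : List (Int × Int) → List (List (Int × Int))
  | [] => []
  | x :: xs =>
    (x :: xs.takeWhile (fun y => decide (y.2 - y.1 = x.2 - x.1))) ::
      pvGroupBy (xs.dropWhile (fun y => decide (y.2 - y.1 = x.2 - x.1)))
termination_by l => l.length
decreasing_by
  simp only [List.length_cons]
  exact Nat.lt_succ_of_le (List.length_dropWhile_le _ _)

def find_unicode_ranges_alt (code_points : List Int) : List (Int × Int) :=
  let sorted_points := PySem.List.sorted (PySem.Set.ofList code_points) (fun x => x) false
  if sorted_points = [] then []
  else
    (pvGroupBy (pvEnumFrom 0 sorted_points)).map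
      (fun group => ((group.headD (0, 0)).2, (group.getLastD (0, 0)).2))

-- ===== PRECONDITION & SPEC =====
def Spec_find_unicode_ranges (code_points : List Int) (out : List (Int × Int)) : Prop := out = find_unicode_ranges_alt code_points
instance (code_points : List Int) (out : List (Int × Int)) : Decidable (Spec_find_unicode_ranges code_points out) := by unfold Spec_find_unicode_ranges; infer_instance

-- ===== CLAIM (what is proved, stated in full; the proofs are below) =====
def Claim_equal_find_unicode_ranges : Prop := ∀ (code_points : List Int), Dom_find_unicode_ranges code_points → Spec_find_unicode_ranges code_points (find_unicode_ranges code_points)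

-- ===== LEMMAS AND PROOFS =====

-- the common recursive description of the range scan
def pvRuns (s e : Int) : List Int → List (Int × Int)
  | [] => [(s, e)]
  | p :: rest => if p = e + 1 then pvRuns s p rest else (s, e) :: pvRuns p p rest

def pvRunEnd (e : Int) : List Int → Int
  | [] => e
  | p :: rest => if p = e + 1 then pvRunEnd p rest else e

def pvRunsTail (e : Int) : List Int → List (Int × Int)
  | [] => []
  | p :: rest => if p = e + 1 then pvRunsTail p rest else pvRuns p p rest

theorem pvRuns_eq (l : List Int) : ∀ s e, pvRuns s e l = (s, pvRunEnd e l) :: pvRunsTail e l := by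
  induction l with
  | nil => intro s e; simp [pvRuns, pvRunEnd, pvRunsTail]
  | cons p rest ih =>
    intro s e
    by_cases h : p = e + 1 <;> simp [pvRuns, pvRunEnd, pvRunsTail, h, ih]

theorem pvFoldA (l : List Int) : ∀ (acc : List (Int × Int)) (s e : Int),
    (l.foldl (fun (st : List (Int × Int) × Int × Int) point =>
        if point = st.2.2 + 1 then (st.1, st.2.1, point)
        else (st.1 ++ [(st.2.1, st.2.2)], point, point)) (acc, s, e)).1
      ++ [((l.foldl (fun (st : List (Int × Int) × Int × Int) point =>
        if point = st.2.2 + 1 then (st.1, st.2.1, point)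
        else (st.1 ++ [(st.2.1, st.2.2)], point, point)) (acc, s, e)).2.1,
          (l.foldl (fun (st : List (Int × Int) × Int × Int) point =>
        if point = st.2.2 + 1 then (st.1, st.2.1, point)
        else (st.1 ++ [(st.2.1, st.2.2)], point, point)) (acc, s, e)).2.2)]
      = acc ++ pvRuns s e l := by
  induction l with
  | nil => intro acc s e; simp [pvRuns]
  | cons p rest ih =>
    intro acc s e
    by_cases h : p = e + 1
    · simp [pvRuns, h, ih]
    · simp [pvRuns, h, ih]

theorem pvMainB (l : List Int) : ∀ (p i : Int),
    (pvGroupBy (pvEnumFrom i (p :: l))).map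
        (fun group => ((group.headD (0, 0)).2, (group.getLastD (0, 0)).2))
      = pvRuns p p l := by
  induction l with
  | nil => intro p i; simp [pvEnumFrom, pvGroupBy, pvRuns]
  | cons q l' ih =>
    intro p i
    by_cases h : q = p + 1
    · have hk : q - (i + 1) = p - i := by omega
      have h' : decide (q - (i + 1) = p - i) = true := by
        simp only [decide_eq_true_eq]; omega
      have hih := ih q (i + 1)
      rw [pvRuns_eq] at hih
      simp only [pvEnumFrom, pvGroupBy, List.takeWhile_cons, List.dropWhile_cons] at hih ⊢
      simp only [hk] at hih
      simp only [h', if_true, List.map_cons] at hih ⊢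
      obtain ⟨h1, h2⟩ := List.cons.injEq _ _ _ _ ▸ hih
      have h1' : ((List.takeWhile (fun y => decide (y.2 - y.1 = p - i))
          (pvEnumFrom (i + 1 + 1) l')).getLastD (i + 1, q)).2 = pvRunEnd q l' := by
        have h3 := congrArg Prod.snd h1
        rwa [List.getLastD_cons] at h3
      rw [pvRuns, if_pos h, pvRuns_eq, h2]
      congr 1
      simp only [List.headD_cons, List.getLastD_cons, h1']
    · have h' : decide (q - (i + 1) = p - i) = false := by
        simp only [decide_eq_false_iff_not]; omega
      simp only [pvEnumFrom, pvGroupBy, List.takeWhile_cons, List.dropWhile_cons]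
      simp only [h', Bool.false_eq_true, if_false, List.map_cons]
      rw [show ((i + 1, q) :: pvEnumFrom (i + 1 + 1) l' : List (Int × Int))
            = pvEnumFrom (i + 1) (q :: l') from rfl]
      rw [ih q (i + 1), pvRuns, if_neg h]
      simp

theorem sortedSet_nil_iff (cps : List Int) :
    (PySem.List.sorted (PySem.Set.ofList cps) (fun x => x) false = []) ↔ cps = [] := by
  rw [PySem.List.sorted_eq_nil_iff]
  constructor
  · intro h
    cases cps with
    | nil => rfl
    | cons c t =>
      exfalso
      have : c ∈ PySem.Set.ofList (c :: t) := by
        rw [PySem.Set.mem_ofList]; exact List.mem_cons_self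
      rw [h] at this; exact (List.not_mem_nil) this
  · intro h; subst h; rfl

-- ===== VERDICT (by name: the statement is the Claim_ definition above) =====
theorem find_unicode_ranges_spec : Claim_equal_find_unicode_ranges := by
  intro cps _
  unfold Spec_find_unicode_ranges find_unicode_ranges find_unicode_ranges_alt
  by_cases h : cps = []
  · subst h; rfl
  · have hs : PySem.List.sorted (PySem.Set.ofList cps) (fun x => x) false ≠ [] := by
      rw [Ne, sortedSet_nil_iff]; exact h
    simp only [h, if_neg hs]
    cases hsp : PySem.List.sorted (PySem.Set.ofList cps) (fun x => x) false with
    | nil => exact absurd hsp hs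
    | cons s0 rest =>
      rw [pvMainB rest s0 0]
      simpa using pvFoldA rest [] s0 s0
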